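-- pv_equiv track=rewrite | github.com/Jasper1467/SteamCDKeyRedeemBot | src/bot.py | valid_steam_key
-- ===== SOURCE A (Python) =====
-- def valid_steam_key(key):
--     if not isinstance(key, str):
--         return False
--     key_parts = key.split("-")
--     return (
--         len(key) == 17
--         and len(key_parts) == 3
--         and all([len(part) == 5 for part in key_parts])
--     )
-- ===== SOURCE B (Python) =====
-- def valid_steam_key(key):
--     if not isinstance(key, str):
--         return False
--     return (
--         len(key) == 17
--         and "-" not in key[:5]
--         and key[5] == "-"
--         and "-" not in key[6:11]
--         and key[11] == "-"
--         and "-" not in key[12:]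
--     )
-- ===== Notes on version B (the rewrite author's own statement) =====
-- stated objective: simpler
-- what changed: B drops the split/len/all pass entirely and instead checks the fixed key layout directly: total length 17 and dash characters exactly at indices 5 and 11, using slice membership tests for the three groups.
import Mathlib
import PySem

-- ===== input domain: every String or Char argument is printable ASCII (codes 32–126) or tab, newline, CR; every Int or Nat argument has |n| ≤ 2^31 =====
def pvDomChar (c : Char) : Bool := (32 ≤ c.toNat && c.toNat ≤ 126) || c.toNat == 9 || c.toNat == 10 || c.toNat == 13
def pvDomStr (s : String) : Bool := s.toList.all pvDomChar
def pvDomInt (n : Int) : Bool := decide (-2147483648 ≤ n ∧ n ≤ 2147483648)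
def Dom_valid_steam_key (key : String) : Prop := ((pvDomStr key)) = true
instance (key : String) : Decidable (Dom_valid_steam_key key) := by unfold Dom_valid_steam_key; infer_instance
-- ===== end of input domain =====

-- B replaces A's split/len/all pass with a direct positional check (fixed dash positions
-- via slices and indexing); objective: simpler/alternative, same cost.

-- ===== PORT A =====
-- key.split("-") with nonempty separator is PySem.Chars.splitOn on the code points.
def valid_steam_key (key : String) : Bool :=
  let key_parts := PySem.Chars.splitOn key.toList ['-']
  (PySem.Str.len key == 17)
    && (key_parts.length == 3)
    && key_parts.all (fun part => PySem.Chars.len part == 5)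

-- ===== PORT B =====
-- "-" not in key[:5] etc. via PySem slices/isIn; key[5] == "-" via pyGet? (in B the
-- index accesses are short-circuit-guarded by len == 17, so pyGet? never yields none
-- on a branch that matters).
def valid_steam_key_alt (key : String) : Bool :=
  let cs := key.toList
  (PySem.Str.len key == 17)
    && !(PySem.Chars.isIn ['-'] (PySem.List.slice cs none (some 5)))
    && (PySem.List.pyGet? cs 5 == some '-')
    && !(PySem.Chars.isIn ['-'] (PySem.List.slice cs (some 6) (some 11)))
    && (PySem.List.pyGet? cs 11 == some '-')
    && !(PySem.Chars.isIn ['-'] (PySem.List.slice cs (some 12) none))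

-- ===== PRECONDITION & SPEC =====
def Spec_valid_steam_key (key : String) (out : Bool) : Prop := out = valid_steam_key_alt key
instance (key : String) (out : Bool) : Decidable (Spec_valid_steam_key key out) := by unfold Spec_valid_steam_key; infer_instance

-- ===== CLAIM (what is proved, stated in full; the proofs are below) =====
def Claim_equal_valid_steam_key : Prop := ∀ (key : String), Dom_valid_steam_key key → Spec_valid_steam_key key (valid_steam_key key)

-- ===== LEMMAS AND PROOFS =====

-- Reference splitter: split a char list on a single character (proof-side model of
-- Python's str.split("-")).
def splitOnChar (c : Char) : List Char → List (List Char)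
  | [] => [[]]
  | x :: xs =>
      if x = c then [] :: splitOnChar c xs
      else (splitOnChar c xs).modifyHead (fun p => x :: p)

theorem splitOnChar_ne_nil (c : Char) (l : List Char) : splitOnChar c l ≠ [] := by
  induction l with
  | nil => simp [splitOnChar]
  | cons x xs ih =>
      simp only [splitOnChar]
      split_ifs
      · simp
      · obtain ⟨h, t, hht⟩ := List.exists_cons_of_ne_nil ih
        simp [hht]

theorem go_eq (c : Char) (l : List Char) : ∀ (fuel : Nat) (cur : List Char)
    (acc : List (List Char)), l.length ≤ fuel →
    PySem.Chars.splitOn.go [c] fuel l cur acc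
      = acc.reverse ++ (splitOnChar c l).modifyHead (fun p => cur.reverse ++ p) := by
  induction l with
  | nil =>
      intro fuel cur acc _
      cases fuel <;>
        · rw [PySem.Chars.splitOn.go.eq_def]
          simp [splitOnChar, List.modifyHead]
  | cons x xs ih =>
      intro fuel cur acc hf
      cases fuel with
      | zero => simp at hf
      | succ f =>
          rw [PySem.Chars.splitOn.go.eq_def]
          obtain ⟨h, t, hht⟩ := List.exists_cons_of_ne_nil (splitOnChar_ne_nil c xs)
          simp only [List.length_cons] at hf
          by_cases hx : x = c
          · have hpre : List.isPrefixOf [c] (x :: xs) = true := by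
              simp [List.isPrefixOf, hx]
            simp only [hpre, if_true]
            rw [show (x :: xs).drop [c].length = xs by simp]
            rw [ih f [] (cur.reverse :: acc) (by omega)]
            simp [splitOnChar, hx, hht, List.modifyHead]
          · have hpre : List.isPrefixOf [c] (x :: xs) = false := by
              simp only [List.isPrefixOf, Bool.and_eq_false_iff, List.isPrefixOf]
              left
              simp [beq_eq_false_iff_ne]
              intro hc; exact absurd hc.symm hx
            simp only [hpre, Bool.false_eq_true, if_false]
            rw [ih f (x :: cur) acc (by omega)]
            simp [splitOnChar, hx, hht, List.modifyHead]

theorem splitOn_eq_splitOnChar (c : Char) (l : List Char) :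
    PySem.Chars.splitOn l [c] = splitOnChar c l := by
  unfold PySem.Chars.splitOn
  rw [go_eq c l (l.length + 1) [] [] (by omega)]
  obtain ⟨h, t, hht⟩ := List.exists_cons_of_ne_nil (splitOnChar_ne_nil c l)
  simp [hht, List.modifyHead]

theorem splitOnChar_no_sep (c : Char) (a : List Char) (h : c ∉ a) :
    splitOnChar c a = [a] := by
  induction a with
  | nil => simp [splitOnChar]
  | cons x xs ih =>
      simp only [List.mem_cons, not_or] at h
      have hx : ¬ x = c := fun he => h.1 he.symm
      simp [splitOnChar, hx, ih h.2, List.modifyHead]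

theorem splitOnChar_append (c : Char) (a l : List Char) (h : c ∉ a) :
    splitOnChar c (a ++ l) = (splitOnChar c l).modifyHead (fun p => a ++ p) := by
  induction a with
  | nil =>
      obtain ⟨h', t, hht⟩ := List.exists_cons_of_ne_nil (splitOnChar_ne_nil c l)
      simp [hht, List.modifyHead]
  | cons x xs ih =>
      simp only [List.mem_cons, not_or] at h
      obtain ⟨h', t, hht⟩ := List.exists_cons_of_ne_nil (splitOnChar_ne_nil c (xs ++ l))
      rw [List.cons_append]
      simp only [splitOnChar, if_neg (fun he : x = c => h.1 he.symm), ih h.2]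
      obtain ⟨h2, t2, hht2⟩ := List.exists_cons_of_ne_nil (splitOnChar_ne_nil c l)
      simp [hht2, List.modifyHead]

def joinWith (c : Char) : List (List Char) → List Char
  | [] => []
  | [p] => p
  | p :: ps => p ++ c :: joinWith c ps

theorem joinWith_splitOnChar (c : Char) (l : List Char) :
    joinWith c (splitOnChar c l) = l := by
  induction l with
  | nil => simp [splitOnChar, joinWith]
  | cons x xs ih =>
      obtain ⟨h, t, hht⟩ := List.exists_cons_of_ne_nil (splitOnChar_ne_nil c xs)
      by_cases hx : x = c
      · subst hx
        simp only [splitOnChar, if_true]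
        rw [hht] at ih ⊢
        simpa [joinWith] using ih
      · simp only [splitOnChar, if_neg hx]
        rw [hht] at ih ⊢
        cases t with
        | nil => simpa [joinWith, List.modifyHead] using ih
        | cons t0 ts => simpa [joinWith, List.modifyHead] using ih

theorem splitOnChar_not_mem (c : Char) (l : List Char) :
    ∀ p ∈ splitOnChar c l, c ∉ p := by
  induction l with
  | nil => simp [splitOnChar]
  | cons x xs ih =>
      obtain ⟨h, t, hht⟩ := List.exists_cons_of_ne_nil (splitOnChar_ne_nil c xs)
      by_cases hx : x = c
      · simp only [splitOnChar, if_pos hx]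
        intro p hp
        rcases List.mem_cons.mp hp with rfl | hp
        · simp
        · exact ih p hp
      · simp only [splitOnChar, if_neg hx, hht, List.modifyHead]
        rw [hht] at ih
        intro p hp
        rcases List.mem_cons.mp hp with rfl | hp
        · have hh := ih h (List.mem_cons_self ..)
          simp only [List.mem_cons, not_or]
          exact ⟨fun he => hx he.symm, hh⟩
        · exact ih p (List.mem_cons_of_mem _ hp)

-- The common shape both programs test for.
def KeyShape (cs : List Char) : Prop :=
  ∃ a b d : List Char, cs = a ++ '-' :: (b ++ '-' :: d) ∧
    a.length = 5 ∧ b.length = 5 ∧ d.length = 5 ∧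
    '-' ∉ a ∧ '-' ∉ b ∧ '-' ∉ d

theorem singleton_infix_iff (x : Char) (l : List Char) : [x] <:+: l ↔ x ∈ l := by
  constructor
  · intro h; exact h.subset (by simp)
  · intro h
    obtain ⟨s, t, hst⟩ := List.append_of_mem h
    exact ⟨s, t, by simp [hst]⟩

theorem A_iff (key : String) : valid_steam_key key = true ↔ KeyShape key.toList := by
  unfold valid_steam_key
  rw [splitOn_eq_splitOnChar]
  simp only [Bool.and_eq_true, beq_iff_eq, List.all_eq_true, PySem.Str.len, PySem.Chars.len,
    PySem.Chars.len_eq]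
  constructor
  · rintro ⟨⟨h17, h3⟩, hall⟩
    obtain ⟨a, b, d, habd⟩ := List.length_eq_three.mp h3
    refine ⟨a, b, d, ?_, ?_, ?_, ?_, ?_, ?_, ?_⟩
    · have := joinWith_splitOnChar '-' key.toList
      rw [habd] at this
      simpa [joinWith] using this.symm
    · exact_mod_cast hall a (by rw [habd]; simp)
    · exact_mod_cast hall b (by rw [habd]; simp)
    · exact_mod_cast hall d (by rw [habd]; simp)
    · exact splitOnChar_not_mem '-' key.toList a (by rw [habd]; simp)
    · exact splitOnChar_not_mem '-' key.toList b (by rw [habd]; simp)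
    · exact splitOnChar_not_mem '-' key.toList d (by rw [habd]; simp)
  · rintro ⟨a, b, d, hcs, ha, hb, hd, hna, hnb, hnd⟩
    rw [hcs]
    have hsplit : splitOnChar '-' (a ++ '-' :: (b ++ '-' :: d)) = [a, b, d] := by
      rw [splitOnChar_append '-' a _ hna]
      simp only [splitOnChar, if_true]
      rw [splitOnChar_append '-' b _ hnb]
      simp only [splitOnChar, if_true]
      rw [splitOnChar_no_sep '-' d hnd]
      simp [List.modifyHead]
    rw [hsplit]
    refine ⟨⟨?_, rfl⟩, ?_⟩
    · simp [ha, hb, hd]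
    · intro p hp
      rcases List.mem_cons.mp hp with rfl | hp
      · exact_mod_cast ha
      rcases List.mem_cons.mp hp with rfl | hp
      · exact_mod_cast hb
      rcases List.mem_cons.mp hp with rfl | hp
      · exact_mod_cast hd
      · simp at hp

theorem B_iff (key : String) : valid_steam_key_alt key = true ↔ KeyShape key.toList := by
  unfold valid_steam_key_alt
  have s1 : ∀ xs : List Char, PySem.List.slice xs none (some 5) = xs.take 5 :=
    fun xs => by rw [PySem.List.slice_to xs (by norm_num)]; rfl
  have s2 : ∀ xs : List Char, PySem.List.slice xs (some 6) (some 11) = (xs.drop 6).take 5 :=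
    fun xs => by rw [PySem.List.slice_toNat xs (by norm_num) (by norm_num)]; rfl
  have s3 : ∀ xs : List Char, PySem.List.slice xs (some 12) none = xs.drop 12 :=
    fun xs => by rw [PySem.List.slice_from xs (by norm_num)]; rfl
  simp only [Bool.and_eq_true, Bool.not_eq_true', beq_iff_eq, PySem.Str.len, s1, s2, s3,
    PySem.Chars.isIn_eq_false_iff, singleton_infix_iff]
  constructor
  · rintro ⟨⟨⟨⟨⟨h17, hn1⟩, h5⟩, hn2⟩, h11⟩, hn3⟩
    set cs := key.toList with hcs
    have h5' : cs[5]? = some '-' := by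
      rw [show ((5:Int)) = ((5:Nat):Int) from by norm_num, PySem.List.pyGet?_natCast] at h5
      exact h5
    have h11' : cs[11]? = some '-' := by
      rw [show ((11:Int)) = ((11:Nat):Int) from by norm_num, PySem.List.pyGet?_natCast] at h11
      exact h11
    have h5lt : 5 < cs.length := by omega
    have h11lt : 11 < cs.length := by omega
    have g5 : cs[5] = '-' := by
      have := List.getElem?_eq_getElem h5lt
      rw [this] at h5'; exact Option.some.inj h5'
    have g11 : cs[11] = '-' := by
      have := List.getElem?_eq_getElem h11lt
      rw [this] at h11'; exact Option.some.inj h11'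
    refine ⟨cs.take 5, (cs.drop 6).take 5, cs.drop 12, ?_, ?_, ?_, ?_, hn1, hn2, hn3⟩
    · have e2 : cs.drop 5 = '-' :: cs.drop 6 := by
        rw [List.drop_eq_getElem_cons h5lt, g5]
      have e5 : cs.drop 11 = '-' :: cs.drop 12 := by
        rw [List.drop_eq_getElem_cons h11lt, g11]
      have e4 : List.drop 5 (List.drop 6 cs) = '-' :: cs.drop 12 := by
        rw [List.drop_drop]; norm_num [e5]
      have e6 : cs.drop 6 = (cs.drop 6).take 5 ++ '-' :: cs.drop 12 := by
        conv_lhs => rw [← List.take_append_drop 5 (cs.drop 6)]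
        rw [e4]
      calc cs = cs.take 5 ++ cs.drop 5 := (List.take_append_drop 5 cs).symm
        _ = cs.take 5 ++ '-' :: cs.drop 6 := by rw [e2]
        _ = cs.take 5 ++ '-' :: ((cs.drop 6).take 5 ++ '-' :: cs.drop 12) := by
              exact congrArg (fun t => cs.take 5 ++ '-' :: t) e6
    · simp [List.length_take]; omega
    · simp [List.length_take, List.length_drop]; omega
    · simp [List.length_drop]; omega
  · rintro ⟨a, b, d, hcs, ha, hb, hd, hna, hnb, hnd⟩
    rw [hcs]
    have hta : (a ++ '-' :: (b ++ '-' :: d)).take 5 = a := by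
      rw [← ha]; exact List.take_left
    have hdb : (a ++ '-' :: (b ++ '-' :: d)).drop 6 = b ++ '-' :: d := by
      rw [List.drop_append, List.drop_eq_nil_of_le (by omega)]
      simp [ha]
    have hdd : (a ++ '-' :: (b ++ '-' :: d)).drop 12 = d := by
      rw [List.drop_append, List.drop_eq_nil_of_le (by omega)]
      simp only [ha, List.nil_append]
      show List.drop (6 + 1) ('-' :: (b ++ '-' :: d)) = d
      rw [List.drop_succ_cons, List.drop_append, List.drop_eq_nil_of_le (by omega)]
      simp [hb]
    refine ⟨⟨⟨⟨⟨?_, ?_⟩, ?_⟩, ?_⟩, ?_⟩, ?_⟩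
    · simp [ha, hb, hd]
    · rw [hta]; exact hna
    · have h : (a ++ '-' :: (b ++ '-' :: d))[5]? = some '-' := by
        rw [List.getElem?_append_right (by omega : a.length ≤ 5)]
        simp [ha]
      rw [show ((5:Int)) = ((5:Nat):Int) from by norm_num, PySem.List.pyGet?_natCast]
      exact h
    · rw [hdb, ← hb, List.take_left]; exact hnb
    · have h : (a ++ '-' :: (b ++ '-' :: d))[11]? = some '-' := by
        rw [List.getElem?_append_right (by omega : a.length ≤ 11)]
        rw [ha]
        simp only [show 11 - 5 = 6 from rfl]
        rw [List.getElem?_cons]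
        simp only [if_neg (by omega : ¬ (6 = 0))]
        rw [List.getElem?_append_right (by omega : b.length ≤ 6 - 1)]
        simp [hb]
      rw [show ((11:Int)) = ((11:Nat):Int) from by norm_num, PySem.List.pyGet?_natCast]
      exact h
    · rw [hdd]; exact hnd

-- ===== VERDICT (by name: the statement is the Claim_ definition above) =====
theorem valid_steam_key_spec : Claim_equal_valid_steam_key := by
  intro key _
  unfold Spec_valid_steam_key
  rw [Bool.eq_iff_iff, A_iff, B_iff]
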